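-- pv_equiv track=rewrite | github.com/jsyeh/leetcode | 2255/count-prefixes-of-a-given-string.py | countPrefixes
-- ===== SOURCE A (Python) =====
-- from typing import List
--
-- def countPrefixes(words: List[str], s: str) -> int:
--     ans = 0
--     lenS = len(s)
--     for word in words:
--         N = len(word)
--         if N>lenS: # 太長的話, 一定不可能
--             continue
--         if s[:N] == word:
--             ans += 1
--     return ans
-- ===== SOURCE B (Python) =====
-- def countPrefixes(words, s):
--     counts = {}
--     maxlen = 0
--     for w in words:
--         counts[w] = counts.get(w, 0) + 1
--         if len(w) > maxlen:
--             maxlen = len(w)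
--     ans = 0
--     for i in range(min(len(s), maxlen) + 1):
--         ans += counts.get(s[:i], 0)
--     return ans
-- ===== Notes on version B (the rewrite author's own statement) =====
-- stated objective: alternative
-- what changed: Instead of testing every word against s, B builds a frequency table of the words (and their maximum length) in one pass, then sums the table counts of each prefix s[:i] for i up to min(len(s), max word length), so the per-word prefix comparison disappears.
import Mathlib
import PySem

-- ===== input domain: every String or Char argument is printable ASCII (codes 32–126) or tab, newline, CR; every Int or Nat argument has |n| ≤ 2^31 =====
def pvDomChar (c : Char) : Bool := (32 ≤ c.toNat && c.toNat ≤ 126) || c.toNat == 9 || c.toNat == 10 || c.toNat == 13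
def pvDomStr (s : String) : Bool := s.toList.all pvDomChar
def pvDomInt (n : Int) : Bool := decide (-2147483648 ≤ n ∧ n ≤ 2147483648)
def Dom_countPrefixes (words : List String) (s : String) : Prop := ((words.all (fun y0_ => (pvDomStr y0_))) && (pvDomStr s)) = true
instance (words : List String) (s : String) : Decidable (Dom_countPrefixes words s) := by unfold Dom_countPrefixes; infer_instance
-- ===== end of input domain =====

-- B replaces the per-word prefix test with a frequency table of the words plus one lookup per prefix of s (alternative decomposition, same exact result).

-- ===== PORT A =====
def countPrefixes (words : List String) (s : String) : Int :=
  words.foldl (fun ans word =>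
    if (word.length : Int) > (s.length : Int) then ans
    else if PySem.Str.slice s none (some (word.length : Int)) == word then ans + 1
    else ans) 0

-- ===== PORT B =====
def countPrefixes_alt (words : List String) (s : String) : Int :=
  let st : PySem.Dict String Int × Int :=
    words.foldl (fun p w =>
      (p.1.insert w (p.1.getD w 0 + 1),
       if (w.length : Int) > p.2 then (w.length : Int) else p.2))
      (PySem.Dict.empty, 0)
  (PySem.List.pyRange 0 (min (s.length : Int) st.2 + 1) 1).foldl
    (fun ans i => ans + st.1.getD (PySem.Str.slice s none (some i)) 0) 0

-- ===== PRECONDITION & SPEC =====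
def Spec_countPrefixes (words : List String) (s : String) (out : Int) : Prop := out = countPrefixes_alt words s
instance (words : List String) (s : String) (out : Int) : Decidable (Spec_countPrefixes words s out) := by unfold Spec_countPrefixes; infer_instance

-- ===== CLAIM (what is proved, stated in full; the proofs are below) =====
def Claim_equal_countPrefixes : Prop := ∀ (words : List String) (s : String), Dom_countPrefixes words s → Spec_countPrefixes words s (countPrefixes words s)

-- ===== LEMMAS AND PROOFS =====

-- prefix of s of length i, as both ports compute it
def pvPfx (s : String) (i : Int) : String := PySem.Str.slice s none (some i)

-- the number of k ∈ range (m+1) with t.take k = w is the indicator "w is a take of t of length ≤ m"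
theorem pvKeyAux (t w : List Char) : ∀ m, m ≤ t.length →
    ((List.range (m+1)).map (fun k => if t.take k = w then (1:Int) else 0)).sum
      = if w.length ≤ m ∧ t.take w.length = w then 1 else 0 := by
  intro m
  induction m with
  | zero =>
    intro _
    simp only [List.range_succ, List.range_zero, List.nil_append, List.map_cons, List.map_nil,
      List.sum_cons, List.sum_nil, List.take_zero, Nat.le_zero]
    by_cases hw : w = []
    · subst hw; simp
    · have hcon : ¬ (w.length = 0 ∧ t.take w.length = w) := by
        rintro ⟨h1, _⟩; exact hw (List.eq_nil_of_length_eq_zero h1)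
      rw [if_neg (Ne.symm hw), if_neg hcon]; norm_num
  | succ m ih =>
    intro hm
    have hm' : m ≤ t.length := Nat.le_of_succ_le hm
    rw [List.range_succ, List.map_append, List.sum_append, ih hm']
    have hlen : (t.take (m+1)).length = m + 1 := by
      rw [List.length_take]; omega
    by_cases h : t.take (m+1) = w
    · have hwlen : w.length = m + 1 := by rw [← h, hlen]
      rw [if_neg (show ¬ (w.length ≤ m ∧ t.take w.length = w) by rintro ⟨h1, _⟩; omega)]
      rw [if_pos (show w.length ≤ m + 1 ∧ t.take w.length = w from
            ⟨by omega, by rw [hwlen]; exact h⟩)]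
      simp [h]
    · simp only [List.map_cons, List.map_nil, List.sum_cons, List.sum_nil, if_neg h, add_zero]
      by_cases hwl : w.length = m + 1
      · rw [if_neg (show ¬ (w.length ≤ m ∧ t.take w.length = w) by rintro ⟨h1, _⟩; omega)]
        rw [if_neg (show ¬ (w.length ≤ m + 1 ∧ t.take w.length = w) by
              rintro ⟨_, h2⟩; exact h (by rwa [hwl] at h2))]
      · by_cases hle : w.length ≤ m
        · exact if_congr (Iff.intro (fun ⟨_, h2⟩ => ⟨by omega, h2⟩) (fun ⟨_, h2⟩ => ⟨hle, h2⟩))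
            rfl rfl
        · rw [if_neg (show ¬ (w.length ≤ m ∧ t.take w.length = w) by rintro ⟨h1, _⟩; omega)]
          rw [if_neg (show ¬ (w.length ≤ m + 1 ∧ t.take w.length = w) by rintro ⟨h1, _⟩; omega)]

-- A's fold accumulates exactly the 0/1 indicator of each word
theorem pvFoldA (s : String) : ∀ (ws : List String) (a : Int),
    ws.foldl (fun ans word =>
      if (word.length : Int) > (s.length : Int) then ans
      else if PySem.Str.slice s none (some (word.length : Int)) == word then ans + 1
      else ans) a
    = a + (ws.map (fun w =>
        if w.length ≤ s.length ∧ pvPfx s (w.length : Int) = w then (1:Int) else 0)).sum := by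
  intro ws
  induction ws with
  | nil => intro a; simp
  | cons w ws ih =>
    intro a
    simp only [List.foldl_cons, List.map_cons, List.sum_cons, ih]
    have hstep : (if (w.length : Int) > (s.length : Int) then a
        else if PySem.Str.slice s none (some (w.length : Int)) == w then a + 1 else a)
      = a + (if w.length ≤ s.length ∧ pvPfx s (w.length : Int) = w then (1:Int) else 0) := by
      unfold pvPfx
      by_cases hgt : (w.length : Int) > (s.length : Int)
      · rw [if_pos hgt,
          if_neg (show ¬ (w.length ≤ s.length ∧ PySem.Str.slice s none (some (w.length : Int)) = w)
            by rintro ⟨h1, _⟩; omega)]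
        ring
      · rw [if_neg hgt]
        by_cases heq : PySem.Str.slice s none (some (w.length : Int)) = w
        · rw [if_pos (beq_iff_eq.mpr heq),
            if_pos (show w.length ≤ s.length ∧ PySem.Str.slice s none (some (w.length : Int)) = w
              from ⟨by omega, heq⟩)]
        · rw [if_neg (by simpa using heq),
            if_neg (show ¬ (w.length ≤ s.length ∧ PySem.Str.slice s none (some (w.length : Int)) = w)
              by rintro ⟨_, h2⟩; exact heq h2)]
          ring
    rw [hstep]; ring

-- the summed counts of prefixes equal the summed indicators over the words
theorem pvSwap (s : String) (mN : Nat) (hmn : mN ≤ s.length) : ∀ (ws : List String),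
    (∀ w ∈ ws, w.length ≤ s.length → w.length ≤ mN) →
    ((List.range (mN+1)).map (fun (k : Nat) => (List.count (pvPfx s (↑k : Int)) ws : Int))).sum
      = (ws.map (fun w =>
          if w.length ≤ s.length ∧ pvPfx s (w.length : Int) = w then (1:Int) else 0)).sum := by
  intro ws
  induction ws with
  | nil => intro _; simp
  | cons w ws ih =>
    intro hb
    have hw : w.length ≤ s.length → w.length ≤ mN := hb w (List.mem_cons_self)
    have ih := ih (fun u hu => hb u (List.mem_cons_of_mem w hu))
    have key : ((List.range (mN+1)).map
        (fun k => if s.toList.take k = w.toList then (1:Int) else 0)).sum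
        = if w.length ≤ s.length ∧ pvPfx s (w.length : Int) = w then 1 else 0 := by
      rw [pvKeyAux s.toList w.toList mN (by rw [String.length_toList]; omega)]
      have hwl : w.toList.length = w.length := String.length_toList
      refine if_congr ?_ rfl rfl
      constructor
      · rintro ⟨h1, h2⟩
        refine ⟨by omega, ?_⟩
        apply String.toList_inj.mp
        unfold pvPfx
        simp only [PySem.Str.toList_slice, PySem.Chars.slice_eq_listSlice,
          PySem.List.slice_to_natCast]
        rwa [← hwl]
      · rintro ⟨h1, h2⟩
        refine ⟨by rw [hwl]; exact hw h1, ?_⟩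
        rw [hwl]
        have h3 := congrArg String.toList h2
        unfold pvPfx at h3
        simpa [PySem.Str.toList_slice, PySem.List.slice_to_natCast] using h3
    have expand : ∀ k ∈ List.range (mN+1),
        ((List.count (pvPfx s (k : Int)) (w :: ws) : Nat) : Int)
        = (List.count (pvPfx s (k : Int)) ws : Int)
          + (if s.toList.take k = w.toList then (1:Int) else 0) := by
      intro k _
      rw [List.count_cons]
      push_cast
      congr 1
      have hiff : ((w == pvPfx s (k:Int)) = true) ↔ (s.toList.take k = w.toList) := by
        rw [beq_iff_eq]
        constructor
        · intro h; rw [h]; unfold pvPfx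
          simp [PySem.Str.toList_slice, PySem.List.slice_to_natCast]
        · intro h
          apply String.toList_inj.mp
          unfold pvPfx
          simp [PySem.Str.toList_slice, PySem.List.slice_to_natCast, h]
      split_ifs with h1 h2 h3 <;> simp_all
    rw [List.map_congr_left expand, PySem.List.sum_map_add_int, ih, key,
      List.map_cons, List.sum_cons]
    ring

-- the pair fold of B splits into a dict fold and a max-length fold
theorem pvPairFold : ∀ (ws : List String) (d : PySem.Dict String Int) (m : Int),
    ws.foldl (fun p w =>
      (p.1.insert w (p.1.getD w 0 + 1),
       if (w.length : Int) > p.2 then (w.length : Int) else p.2)) (d, m)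
    = (ws.foldl (fun d w => d.insert w (d.getD w 0 + 1)) d,
       ws.foldl (fun m w => if (w.length : Int) > m then (w.length : Int) else m) m) := by
  intro ws
  induction ws with
  | nil => intro d m; rfl
  | cons w ws ih => intro d m; simp only [List.foldl_cons]; exact ih _ _

theorem pvMaxFold_le : ∀ (ws : List String) (m : Int),
    m ≤ ws.foldl (fun m w => if (w.length : Int) > m then (w.length : Int) else m) m := by
  intro ws
  induction ws with
  | nil => intro m; simp
  | cons w ws ih =>
    intro m
    simp only [List.foldl_cons]
    refine le_trans ?_ (ih _)
    split_ifs with h <;> omega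

theorem pvMaxFold_bound : ∀ (ws : List String) (m : Int) (w : String), w ∈ ws →
    (w.length : Int) ≤ ws.foldl (fun m w => if (w.length : Int) > m then (w.length : Int) else m) m := by
  intro ws
  induction ws with
  | nil => intro m w h; cases h
  | cons u ws ih =>
    intro m w h
    simp only [List.foldl_cons]
    rcases List.mem_cons.mp h with h | h
    · subst h
      refine le_trans ?_ (pvMaxFold_le ws _)
      split_ifs with hc <;> omega
    · exact ih _ w h

-- ===== VERDICT (by name: the statement is the Claim_ definition above) =====
theorem countPrefixes_spec : Claim_equal_countPrefixes := by
  intro words s _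
  unfold Spec_countPrefixes countPrefixes countPrefixes_alt
  rw [pvPairFold]
  set M : Int := words.foldl (fun m w => if (w.length : Int) > m then (w.length : Int) else m) 0 with hM
  have hM0 : 0 ≤ M := pvMaxFold_le words 0
  set mN : Nat := (min (s.length : Int) M).toNat with hmN
  have hmn : mN ≤ s.length := by omega
  rw [PySem.Dict.foldl_insert_getD_add_one_eq_counter, PySem.List.foldl_add,
    PySem.List.pyRange_one]
  have hb : (min (s.length : Int) M + 1 - 0).toNat = mN + 1 := by omega
  rw [hb, List.map_map]
  simp only [Function.comp_def, PySem.Dict.getD_counter, zero_add]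
  rw [pvFoldA, zero_add]
  have hwb : ∀ w ∈ words, w.length ≤ s.length → w.length ≤ mN := by
    intro w hw _
    have := pvMaxFold_bound words 0 w hw
    omega
  have h := pvSwap s mN hmn words hwb
  simp only [pvPfx] at h ⊢
  exact h.symm
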